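-- pv_equiv track=rewrite | github.com/kasper1810/IPASS_sudoku | main.py | determine_neighbors
-- ===== SOURCE A (Python) =====
-- def determine_neighbors(cells, units):
--     '''
--     determine for each cell all cells that have direct influence on it (cells in the same units: row, column, square)
--     :param cells: all 81 cells in the sudoku
--     :param units: all 36 units in the sudoku
--     :return: dict neighbors with as key the cell and as values all other cells that have direct influence
--     '''
--     neighbors = dict()
--     for cell in cells:
--         neighborset = set()
--         for name in units:
--             if cell in units[name]:
--                 neighborset = neighborset | units[name]
--         neighborset.discard(cell)
--         neighbors[cell] = neighborset
--     return neighbors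
-- ===== SOURCE B (Python) =====
-- def determine_neighbors(cells, units):
--     # Invert once: one pass over the units accumulates, for every member cell,
--     # the union of all units it belongs to; then read the answer off per cell.
--     influencers = {}
--     for unit in units.values():
--         for member in unit:
--             influencers[member] = influencers.get(member, set()) | unit
--     neighbors = {}
--     for cell in cells:
--         neighborset = set(influencers.get(cell, set()))
--         neighborset.discard(cell)
--         neighbors[cell] = neighborset
--     return neighbors
-- ===== Notes on version B (the rewrite author's own statement) =====
-- stated objective: faster
-- what changed: Instead of scanning every unit for every cell (A), B makes one inverting pass over the units, union-accumulating each unit's member set into every member's entry of a dict, then reads each cell's neighbor set off with one lookup.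
import Mathlib
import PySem

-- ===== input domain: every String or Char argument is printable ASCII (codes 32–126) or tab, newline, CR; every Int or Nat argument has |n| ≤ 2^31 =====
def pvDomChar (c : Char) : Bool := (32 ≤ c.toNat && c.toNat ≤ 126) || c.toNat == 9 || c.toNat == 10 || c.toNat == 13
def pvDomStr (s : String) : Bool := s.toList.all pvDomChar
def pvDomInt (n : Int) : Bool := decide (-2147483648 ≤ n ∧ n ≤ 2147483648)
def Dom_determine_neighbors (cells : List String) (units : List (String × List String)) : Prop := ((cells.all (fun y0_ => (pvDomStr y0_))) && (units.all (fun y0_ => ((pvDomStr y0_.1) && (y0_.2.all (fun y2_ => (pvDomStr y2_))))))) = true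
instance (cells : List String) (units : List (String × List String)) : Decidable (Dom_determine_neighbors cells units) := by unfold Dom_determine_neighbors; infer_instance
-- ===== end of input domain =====

-- B replaces A's per-cell scan over all units by a single inverting pass over the units
-- (each unit's member set is union-accumulated into every member's entry), read off per cell.

-- ===== PORT A =====
-- A: for each cell, iterate all unit names, look each unit up in the dict, union it in if the cell is a member.
def determine_neighbors (cells : List String) (units : List (String × List String)) : List (String × List String) :=
  (cells.foldl (fun (nb : PySem.Dict String (List String)) cell =>
      let ns : PySem.Set String :=
        ((PySem.Dict.mk units).keys).foldl (fun (ns : PySem.Set String) name =>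
            -- 'units[name]' with name drawn from the dict's keys always hits: getD's default is never used
            if PySem.Set.contains ((PySem.Dict.mk units).getD name []) cell then
              PySem.Set.union ns ((PySem.Dict.mk units).getD name [])
            else ns)
          PySem.Set.empty
      nb.insert cell (PySem.Set.discard ns cell))
    PySem.Dict.empty).items

-- ===== PORT B =====
def determine_neighbors_alt (cells : List String) (units : List (String × List String)) : List (String × List String) :=
  let influencers : PySem.Dict String (List String) :=
    units.foldl (fun acc p =>
        p.2.foldl (fun (acc : PySem.Dict String (List String)) member =>
            acc.modify member [] (fun s => PySem.Set.union s p.2)) acc)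
      PySem.Dict.empty
  (cells.foldl (fun (nb : PySem.Dict String (List String)) cell =>
      -- Source B's 'set(...)' copy is the identity on immutable Lean lists
      nb.insert cell (PySem.Set.discard (influencers.getD cell []) cell))
    PySem.Dict.empty).items

-- ===== PRECONDITION & SPEC =====
-- Pre_ excludes association lists whose keys repeat: they do not represent any Python dict,
-- so A's key-iteration with first-match lookup is a representation artefact there.
def Pre_determine_neighbors (cells : List String) (units : List (String × List String)) : Prop :=
  (units.map Prod.fst).Nodup
instance (cells : List String) (units : List (String × List String)) : Decidable (Pre_determine_neighbors cells units) := by unfold Pre_determine_neighbors; infer_instance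

def pvWitness_determine_neighbors : List String × (List (String × List String)) :=
  (["a1", "a2", "b1"], [("r", ["a1", "a2"]), ("c", ["a1", "b1"])])

def Spec_determine_neighbors (cells : List String) (units : List (String × List String)) (out : List (String × List String)) : Prop := out = determine_neighbors_alt cells units
instance (cells : List String) (units : List (String × List String)) (out : List (String × List String)) : Decidable (Spec_determine_neighbors cells units out) := by unfold Spec_determine_neighbors; infer_instance

-- ===== CLAIM (what is proved, stated in full; the proofs are below) =====
def Claim_equal_determine_neighbors : Prop := ∀ (cells : List String) (units : List (String × List String)), Dom_determine_neighbors cells units → Pre_determine_neighbors cells units → Spec_determine_neighbors cells units (determine_neighbors cells units)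

-- ===== LEMMAS AND PROOFS =====

-- the per-cell value both programs compute: fold of the unit sets containing the cell, in units order
def pvCellVal (units : List (String × List String)) (cell : String) : PySem.Set String :=
  units.foldl (fun ns p =>
    if PySem.Set.contains p.2 cell then PySem.Set.union ns p.2 else ns) PySem.Set.empty

-- unioning the same iterable twice is a no-op
theorem pv_union_union (s t : PySem.Set String) :
    PySem.Set.union (PySem.Set.union s t) t = PySem.Set.union s t := by
  show PySem.Set.update (PySem.Set.update s t) t = PySem.Set.update s t
  rw [PySem.Set.update_eq_append_filter (PySem.Set.update s t) t]
  rw [List.filter_eq_nil_iff.2 ?_, List.append_nil]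
  intro a ha
  simp only [Bool.not_eq_true, Bool.not_eq_false']
  rw [PySem.Set.contains_iff]
  exact (PySem.Set.mem_update _ _ _).2 (Or.inr ((PySem.Set.mem_ofList _ _).1 ha))

-- B's inner loop over one unit, read at `cell`: unions `t` in exactly when cell is a member
theorem pv_inner_modify (t : List String) (cell : String) :
    ∀ (l : List String) (d : PySem.Dict String (List String)),
      (l.foldl (fun (d : PySem.Dict String (List String)) c =>
          d.modify c [] (fun s => PySem.Set.union s t)) d).getD cell []
        = if cell ∈ l then PySem.Set.union (d.getD cell []) t else d.getD cell [] := by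
  intro l
  induction l with
  | nil => intro d; simp [List.foldl]
  | cons c l ih =>
    intro d
    simp only [List.foldl_cons, ih, PySem.Dict.getD_modify, List.mem_cons]
    by_cases hc : cell = c
    · by_cases hl : cell ∈ l <;> simp [hc, pv_union_union]
    · by_cases hl : cell ∈ l <;> simp [hc, hl]

-- B's accumulator, read at `cell`, is the fold over the unit lists themselves
theorem pv_acc_spec (cell : String) :
    ∀ (units : List (String × List String)) (d : PySem.Dict String (List String)),
      (units.foldl (fun acc p =>
          p.2.foldl (fun (acc : PySem.Dict String (List String)) member =>
              acc.modify member [] (fun s => PySem.Set.union s p.2)) acc) d).getD cell []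
        = units.foldl (fun ns p =>
            if PySem.Set.contains p.2 cell then PySem.Set.union ns p.2 else ns) (d.getD cell []) := by
  intro units
  induction units with
  | nil => intro d; simp [List.foldl]
  | cons p us ih =>
    intro d
    simp only [List.foldl_cons, ih, pv_inner_modify]
    by_cases h : cell ∈ p.2 <;> simp [h]

-- A's keys-fold with dict lookup is the same fold over the pairs, given unique keys
theorem pv_keys_fold (units : List (String × List String)) (h : (units.map Prod.fst).Nodup)
    (cell : String) :
    ((PySem.Dict.mk units).keys).foldl (fun (ns : PySem.Set String) name =>
        if PySem.Set.contains ((PySem.Dict.mk units).getD name []) cell then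
          PySem.Set.union ns ((PySem.Dict.mk units).getD name [])
        else ns) PySem.Set.empty
      = pvCellVal units cell := by
  have hkeys : (PySem.Dict.mk units).keys = units.map Prod.fst := rfl
  have hnd : (PySem.Dict.mk units).keys.Nodup := by rw [hkeys]; exact h
  rw [hkeys, List.foldl_map]
  unfold pvCellVal
  apply PySem.List.foldl_congr_mem
  intro acc p hp
  rw [PySem.Dict.getD_of_mem_items (d := PySem.Dict.mk units) (k := p.1) (v := p.2) hp hnd]

-- ===== VERDICT (by name: the statement is the Claim_ definition above) =====
theorem determine_neighbors_spec : Claim_equal_determine_neighbors := by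
  intro cells units _ hpre
  unfold Pre_determine_neighbors at hpre
  unfold Spec_determine_neighbors determine_neighbors determine_neighbors_alt
  congr 1
  apply PySem.List.foldl_congr_mem
  intro nb cell _
  rw [pv_keys_fold units hpre cell, pv_acc_spec]
  simp [pvCellVal]
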